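-- pv_equiv track=rewrite | github.com/Yawn-Sean/Daily_CF_Problems | daily_problems/2024/05/0513/personal_submission/cf799c_JinYuManTang.py | f
-- ===== SOURCE A (Python) =====
-- from bisect import bisect_left, bisect_right
--
-- inf = float('inf')
--
-- def f(nums, price):
--     pre_max = [0] * (len(nums) + 1)
--     res = 0
--     for i, (cost, beauty) in enumerate(nums):
--         if cost >= price:
--             break
--         j = bisect_left(nums, (price - cost + 1, -inf), hi=i)
--         if j:
--             res = max(res, beauty + pre_max[j])
--         pre_max[i + 1] = max(pre_max[i], beauty)
--     return res
-- ===== SOURCE B (Python) =====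
-- def f(nums, price):
--     # One-pass brute force: compare each item against every earlier item,
--     # no sorting assumptions used beyond the stated precondition.
--     res = 0
--     seen = []
--     for cost, beauty in nums:
--         for cost2, beauty2 in seen:
--             if cost + cost2 <= price:
--                 res = max(res, beauty + beauty2)
--         seen.append((cost, beauty))
--     return res
-- ===== Notes on version B (the rewrite author's own statement) =====
-- stated objective: simpler
-- what changed: Replaces the sorted-input machinery (early break, bisect_left, prefix-max array) with a direct quadratic scan over all unordered pairs, taking the best beauty sum among pairs whose combined cost is within price.
-- outside the precondition, e.g. on f([(2, 0), (5, 8), (5, 1), (1, 1)], 4): A returns 0, B returns 1; on f([(1, -5), (1, 4)], 2): A returns 4, B returns 0; on f([(0, 5), (3, 7)], 3): A returns 0, B returns 12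
import Mathlib
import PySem

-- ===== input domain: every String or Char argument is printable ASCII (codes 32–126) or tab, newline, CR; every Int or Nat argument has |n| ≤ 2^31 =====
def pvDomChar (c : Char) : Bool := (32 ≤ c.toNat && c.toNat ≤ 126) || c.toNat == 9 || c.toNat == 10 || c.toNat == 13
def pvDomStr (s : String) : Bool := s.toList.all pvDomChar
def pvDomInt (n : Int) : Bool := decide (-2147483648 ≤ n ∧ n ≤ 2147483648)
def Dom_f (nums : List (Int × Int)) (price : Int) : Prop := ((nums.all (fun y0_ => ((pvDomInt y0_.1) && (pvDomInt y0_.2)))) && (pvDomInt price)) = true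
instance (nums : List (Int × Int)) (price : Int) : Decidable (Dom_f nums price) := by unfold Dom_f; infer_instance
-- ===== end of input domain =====

-- B drops A's sorted-input machinery (early break, bisect_left, prefix-max array) for a plain
-- quadratic scan over all earlier/later pairs; simpler, not faster.

-- ===== PORT A =====
-- bisect_left(nums, (q, -inf), lo, hi): since -inf compares below every int, the tuple
-- comparison nums[mid] < (q, -inf) is exactly nums[mid].1 < q; the binary search is ported
-- step for step.
def bisectLeft (nums : List (Int × Int)) (q : Int) (lo hi : Nat) : Nat :=
  if _h : lo < hi then
    let mid := (lo + hi) / 2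
    if (nums.getD mid (0, 0)).1 < q then bisectLeft nums q (mid + 1) hi
    else bisectLeft nums q lo mid
  else lo
termination_by hi - lo
decreasing_by all_goals omega

-- the enumerate loop of A, with the break rendered as an early return of res
def loopA (nums : List (Int × Int)) (price : Int) :
    List (Int × Int) → Nat → List Int → Int → Int
  | [], _, _, res => res
  | (c, b) :: rest, i, pre, res =>
    if c ≥ price then res
    else
      let j := bisectLeft nums (price - c + 1) 0 i
      let res' := if 0 < j then max res (b + pre.getD j 0) else res
      loopA nums price rest (i + 1) (pre.set (i + 1) (max (pre.getD i 0) b)) res'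

def f (nums : List (Int × Int)) (price : Int) : Int :=
  loopA nums price nums 0 (List.replicate (nums.length + 1) 0) 0

-- ===== PORT B =====
-- inner loop of B: scan the already-seen items
def innerB (price c b : Int) (seen : List (Int × Int)) (res : Int) : Int :=
  seen.foldl (fun r p => if c + p.1 ≤ price then max r (b + p.2) else r) res

def loopB (price : Int) : List (Int × Int) → List (Int × Int) → Int → Int
  | [], _, res => res
  | (c, b) :: rest, seen, res => loopB price rest (seen ++ [(c, b)]) (innerB price c b seen res)

def f_alt (nums : List (Int × Int)) (price : Int) : Int :=
  loopB price nums [] 0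

-- ===== PRECONDITION & SPEC =====
-- Pre_f covers the function's intended domain (Codeforces 799C: cost-sorted items whose costs
-- are positive — or all below the budget — and whose beauties are non-negative), plus the
-- degenerate inputs (fewer than two items, or every item at least the budget and costing ≥ 1)
-- where both sides trivially return 0; outside it A's bisect/break/zero-seeded prefix-max
-- return accidental values that depend on its machinery, not on the task.
def Pre_f (nums : List (Int × Int)) (price : Int) : Prop :=
  nums.length ≤ 1 ∨
  (∀ p ∈ nums, 1 ≤ p.1 ∧ price ≤ p.1) ∨
  (List.Pairwise (fun p q : Int × Int => p.1 ≤ q.1) nums ∧ (∀ p ∈ nums, 0 ≤ p.2) ∧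
    ((∀ p ∈ nums, 1 ≤ p.1) ∨ (∀ p ∈ nums, p.1 < price)))
instance (nums : List (Int × Int)) (price : Int) : Decidable (Pre_f nums price) := by
  unfold Pre_f; infer_instance

def pvWitness_f : (List (Int × Int)) × Int := ([(1, 2), (2, 3), (3, 1)], 4)

def Spec_f (nums : List (Int × Int)) (price : Int) (out : Int) : Prop := out = f_alt nums price
instance (nums : List (Int × Int)) (price : Int) (out : Int) : Decidable (Spec_f nums price out) := by
  unfold Spec_f; infer_instance

-- ===== CLAIM (what is proved, stated in full; the proofs are below) =====
def Claim_equal_f : Prop := ∀ (nums : List (Int × Int)) (price : Int),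
  Dom_f nums price → Pre_f nums price → Spec_f nums price (f nums price)

-- ===== LEMMAS AND PROOFS =====

-- cost of the k-th item (default matches the port's getD default)
def costD (nums : List (Int × Int)) (k : Nat) : Int := (nums.getD k (0, 0)).1

-- A's running prefix maximum (seeded with 0, as pre_max is)
def pm (l : List (Int × Int)) : Int := l.foldl (fun a p => max a p.2) 0

theorem costD_mono (nums : List (Int × Int))
    (h : List.Pairwise (fun p q : Int × Int => p.1 ≤ q.1) nums) :
    ∀ k l, k ≤ l → l < nums.length → costD nums k ≤ costD nums l := by
  intro k l hkl hl
  have hk : k < nums.length := lt_of_le_of_lt (by omega) hl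
  rcases eq_or_lt_of_le hkl with rfl | hlt
  · exact le_refl _
  · have := (List.pairwise_iff_getElem.mp h) k l hk hl hlt
    simpa [costD, List.getD_eq_getElem?_getD, List.getElem?_eq_getElem hk,
      List.getElem?_eq_getElem hl] using this

theorem bisect_spec (nums : List (Int × Int)) (q : Int)
    (hmono : ∀ k l, k ≤ l → l < nums.length → costD nums k ≤ costD nums l) :
    ∀ n lo hi, hi - lo ≤ n → lo ≤ hi → hi ≤ nums.length →
      lo ≤ bisectLeft nums q lo hi ∧ bisectLeft nums q lo hi ≤ hi ∧
      (∀ k, lo ≤ k → k < bisectLeft nums q lo hi → costD nums k < q) ∧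
      (∀ k, bisectLeft nums q lo hi ≤ k → k < hi → ¬ costD nums k < q) := by
  intro n
  induction n with
  | zero =>
    intro lo hi hfuel hle hlen
    have heq : lo = hi := by omega
    subst heq
    rw [bisectLeft]
    simp only [lt_irrefl, dite_false]
    exact ⟨le_refl _, le_refl _, fun k h1 h2 => absurd h2 (by omega),
      fun k h1 h2 => absurd h2 (by omega)⟩
  | succ n ih =>
    intro lo hi hfuel hle hlen
    by_cases h : lo < hi
    · rw [bisectLeft]
      simp only [h, dite_true]
      have hm1 : lo ≤ (lo + hi) / 2 := by omega
      have hm2 : (lo + hi) / 2 < hi := by omega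
      by_cases hcmp : (nums.getD ((lo + hi) / 2) (0, 0)).1 < q
      · simp only [hcmp, if_true]
        obtain ⟨h1, h2, h3, h4⟩ := ih ((lo + hi) / 2 + 1) hi (by omega) (by omega) hlen
        refine ⟨by omega, h2, ?_, h4⟩
        intro k hk1 hk2
        by_cases hk : k ≤ (lo + hi) / 2
        · exact lt_of_le_of_lt (hmono k ((lo + hi) / 2) hk (by omega)) hcmp
        · exact h3 k (by omega) hk2
      · simp only [hcmp, if_false]
        obtain ⟨h1, h2, h3, h4⟩ := ih lo ((lo + hi) / 2) (by omega) (by omega) (by omega)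
        refine ⟨h1, by omega, h3, ?_⟩
        intro k hk1 hk2
        by_cases hk : k < (lo + hi) / 2
        · exact h4 k hk1 hk
        · intro hlt
          exact hcmp (lt_of_le_of_lt (hmono ((lo + hi) / 2) k (by omega) (by omega)) hlt)
    · have heq : lo = hi := by omega
      subst heq
      rw [bisectLeft]
      simp only [lt_irrefl, dite_false]
      exact ⟨le_refl _, le_refl _, fun k h1 h2 => absurd h2 (by omega),
        fun k h1 h2 => absurd h2 (by omega)⟩

theorem innerB_false (price c b : Int) :
    ∀ (l : List (Int × Int)) (res : Int), (∀ p ∈ l, ¬ (c + p.1 ≤ price)) →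
      innerB price c b l res = res := by
  intro l
  induction l with
  | nil => intro res _; rfl
  | cons x xs ih =>
    intro res h
    have hx := h x (List.mem_cons_self)
    simp only [innerB, List.foldl_cons, hx, if_false]
    exact ih res (fun p hp => h p (List.mem_cons_of_mem _ hp))

theorem innerB_true (price c b : Int) :
    ∀ (l : List (Int × Int)) (res m : Int), (∀ p ∈ l, c + p.1 ≤ price) →
      innerB price c b l (max res (b + m)) =
        max res (b + l.foldl (fun a p => max a p.2) m) := by
  intro l
  induction l with
  | nil => intro res m _; rfl
  | cons x xs ih =>
    intro res m h
    have hx := h x (List.mem_cons_self)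
    simp only [innerB, List.foldl_cons, hx, if_true] at *
    have : max (max res (b + m)) (b + x.2) = max res (b + max m x.2) := by
      rw [← max_add_add_left, max_assoc]
    rw [this]
    exact ih res (max m x.2) (fun p hp => h p (List.mem_cons_of_mem _ hp))

theorem loopB_noop (price : Int) :
    ∀ (l seen : List (Int × Int)) (res : Int),
      (∀ p ∈ l, price ≤ p.1) → (∀ p ∈ seen, 1 ≤ p.1) → (∀ p ∈ l, 1 ≤ p.1) →
      loopB price l seen res = res := by
  intro l
  induction l with
  | nil => intro seen res _ _ _; rfl
  | cons x xs ih =>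
    intro seen res h1 h2 h3
    obtain ⟨c, b⟩ := x
    have hc : price ≤ c := h1 (c, b) (List.mem_cons_self)
    rw [loopB, innerB_false]
    · exact ih _ res (fun p hp => h1 p (List.mem_cons_of_mem _ hp))
        (by intro p hp
            rcases List.mem_append.mp hp with hp | hp
            · exact h2 p hp
            · simp at hp; subst hp; exact h3 (c, b) (List.mem_cons_self))
        (fun p hp => h3 p (List.mem_cons_of_mem _ hp))
    · intro p hp
      have := h2 p hp
      omega

theorem pm_append (l : List (Int × Int)) (x : Int × Int) :
    pm (l ++ [x]) = max (pm l) x.2 := by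
  simp [pm, List.foldl_append]

theorem main_lemma (nums : List (Int × Int)) (price : Int)
    (hchain : List.Pairwise (fun p q : Int × Int => p.1 ≤ q.1) nums)
    (hb : ∀ p ∈ nums, 0 ≤ p.2)
    (hcase : (∀ p ∈ nums, 1 ≤ p.1) ∨ (∀ p ∈ nums, p.1 < price)) :
    ∀ (suff : List (Int × Int)) (i : Nat) (pre : List Int) (res : Int),
      nums.drop i = suff →
      pre.length = nums.length + 1 →
      (∀ k, k ≤ i → pre.getD k 0 = pm (nums.take k)) →
      loopA nums price suff i pre res = loopB price suff (nums.take i) res := by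
  intro suff
  induction suff with
  | nil => intro i pre res _ _ _; rfl
  | cons hd rest ih =>
    intro i pre res hdrop hlen hpre
    obtain ⟨c, b⟩ := hd
    have hi : i < nums.length := by
      by_contra h
      have h0 : nums.drop i = [] := List.drop_eq_nil_of_le (by omega)
      rw [hdrop] at h0; simp at h0
    have hget : nums[i]? = some (c, b) := by
      have h0 : (nums.drop i)[0]? = nums[i + 0]? := List.getElem?_drop
      rw [hdrop] at h0; simpa using h0.symm
    have hgetE : nums[i]'hi = (c, b) := by
      have := List.getElem?_eq_getElem hi
      rw [hget] at this; exact (Option.some.inj this).symm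
    have hrest : nums.drop (i + 1) = rest := by
      rw [← List.tail_drop, hdrop]; rfl
    have htake : nums.take (i + 1) = nums.take i ++ [(c, b)] := by
      simp [List.take_add_one, hget]
    -- cost of index k as an element access
    have hcost : ∀ k, (h : k < nums.length) → costD nums k = (nums[k]'h).1 := by
      intro k h
      simp [costD, List.getD, List.getElem?_eq_getElem h]
    have hmono := costD_mono nums hchain
    by_cases hc : c ≥ price
    · -- A breaks; B's remaining iterations are all no-ops
      show (if c ≥ price then res else _) = _
      rw [if_pos hc]
      have hcb_mem : (c, b) ∈ nums :=
        List.mem_of_mem_drop (l := nums) (by rw [hdrop]; exact List.mem_cons_self)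
      rcases hcase with hone | hlt
      · symm
        apply loopB_noop
        · -- every remaining element costs at least price
          intro p hp
          rw [← hdrop] at hp
          obtain ⟨k, hk, hpk⟩ := List.mem_iff_getElem.mp hp
          have hik : i + k < nums.length := by simp at hk; omega
          have hpe : p = nums[i + k]'hik := by
            rw [← hpk]; exact List.getElem_drop
          have h1 : costD nums i ≤ costD nums (i + k) := hmono i (i + k) (by omega) hik
          rw [hcost i hi, hcost (i + k) hik, hgetE] at h1
          rw [hpe]; omega
        · intro p hp; exact hone p (List.mem_of_mem_take hp)
        · intro p hp
          rw [← hdrop] at hp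
          exact hone p (List.mem_of_mem_drop hp)
      · exact absurd (hlt (c, b) hcb_mem) (by omega)
    · show (if c ≥ price then res else _) = _
      rw [if_neg hc]
      have hIH := ih (i + 1) (pre.set (i + 1) (max (pre.getD i 0) b))
        (if 0 < bisectLeft nums (price - c + 1) 0 i then
            max res (b + pre.getD (bisectLeft nums (price - c + 1) 0 i) 0) else res)
        hrest
        (by simp [hlen])
        (by
          intro k hk
          by_cases hki : k ≤ i
          · have hne : i + 1 ≠ k := by omega
            simp only [List.getD, List.getElem?_set_ne hne]
            exact hpre k hki
          · have hk1 : k = i + 1 := by omega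
            subst hk1
            have hlt : i + 1 < pre.length := by omega
            simp only [List.getD, List.getElem?_set_self hlt, Option.getD_some]
            rw [htake, pm_append]
            have hpi := hpre i (le_refl i)
            simp only [List.getD] at hpi
            simp [hpi])
      rw [hIH]
      show loopB price rest _ _ = loopB price rest (nums.take i ++ [(c, b)]) _
      rw [← htake]
      congr 1
      -- remaining: A's bisect+prefix-max candidate equals B's scan of the seen items
      obtain ⟨hj0, hji, hjlt, hjge⟩ := bisect_spec nums (price - c + 1) hmono i 0 i
        (by omega) (by omega) (by omega)
      set j := bisectLeft nums (price - c + 1) 0 i with hjdef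
      have hsplit : nums.take i = nums.take j ++ (nums.take i).drop j := by
        conv_lhs => rw [← List.take_append_drop j (nums.take i)]
        rw [List.take_take, min_eq_left hji]
      have happ : ∀ l1 l2 r, innerB price c b (l1 ++ l2) r =
          innerB price c b l2 (innerB price c b l1 r) := by
        intro l1 l2 r; simp [innerB, List.foldl_append]
      rw [hsplit, happ]
      have hfalse : ∀ p ∈ (nums.take i).drop j, ¬ (c + p.1 ≤ price) := by
        intro p hp
        obtain ⟨k, hk, hpk⟩ := List.mem_iff_getElem.mp hp
        have hklen : j + k < i := by simp at hk; omega
        have hik : j + k < nums.length := by omega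
        have hpe : p = nums[j + k]'hik := by
          rw [← hpk, List.getElem_drop, List.getElem_take]
        have h1 := hjge (j + k) (by omega) hklen
        rw [hcost (j + k) hik] at h1
        rw [hpe]; omega
      rw [innerB_false price c b _ _ hfalse]
      by_cases hj : 0 < j
      · rw [if_pos hj]
        have hjlen : (nums.take j).length = j := by
          simp; omega
        cases htj : nums.take j with
        | nil => rw [htj] at hjlen; simp at hjlen; omega
        | cons x xs =>
          have htrue : ∀ p ∈ nums.take j, c + p.1 ≤ price := by
            intro p hp
            obtain ⟨k, hk, hpk⟩ := List.mem_iff_getElem.mp hp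
            have hkj : k < j := by simpa [hjlen] using hk
            have hik : k < nums.length := by omega
            have hpe : p = nums[k]'hik := by
              rw [← hpk, List.getElem_take]
            have h1 := hjlt k (by omega) hkj
            rw [hcost k hik] at h1
            rw [hpe]; omega
          rw [htj] at htrue
          have hx := htrue x List.mem_cons_self
          have hx2 : (0 : Int) ≤ x.2 := by
            have hxm : x ∈ nums.take j := by rw [htj]; exact List.mem_cons_self
            exact hb x (List.mem_of_mem_take hxm)
          have hstep : innerB price c b (x :: xs) res =
              innerB price c b xs (max res (b + x.2)) := by
            simp [innerB, hx]
          rw [hstep,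
            innerB_true price c b xs res x.2 (fun p hp => htrue p (List.mem_cons_of_mem _ hp))]
          rw [hpre j (by omega), htj]
          have : pm (x :: xs) = xs.foldl (fun a p => max a p.2) x.2 := by
            simp [pm, max_eq_right hx2]
          rw [this]
      · rw [if_neg hj]
        have hj0' : j = 0 := by omega
        rw [hj0', List.take_zero]
        rfl

-- ===== VERDICT (by name: the statement is the Claim_ definition above) =====
theorem f_spec : Claim_equal_f := by
  intro nums price _hdom hpre
  unfold Spec_f f f_alt
  rcases hpre with h1 | h2 | ⟨hs, hbeauty, hcase⟩
  · -- fewer than two items: both sides return 0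
    match nums, h1 with
    | [], _ => rfl
    | [(c, b)], _ =>
      have hb0 : bisectLeft [(c, b)] (price - c + 1) 0 0 = 0 := by
        rw [bisectLeft]; simp
      by_cases hc : c ≥ price
      · simp [loopA, loopB, innerB, hc]
      · simp [loopA, loopB, innerB, hc, hb0]
  · -- every item costs at least the budget (and at least 1): both sides return 0
    cases nums with
    | nil => rfl
    | cons x rest =>
      obtain ⟨c, b⟩ := x
      have hc : c ≥ price := (h2 (c, b) List.mem_cons_self).2
      show (if c ≥ price then (0 : Int) else _) = _
      rw [if_pos hc]
      symm
      exact loopB_noop price ((c, b) :: rest) [] 0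
        (fun p hp => (h2 p hp).2) (by simp) (fun p hp => (h2 p hp).1)
  · have h := main_lemma nums price hs hbeauty hcase nums 0
      (List.replicate (nums.length + 1) 0) 0 rfl (by simp)
      (by intro k hk; interval_cases k; simp [pm, List.getD])
    simpa using h
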